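-- pv_equiv track=rewrite | github.com/okanacer332/ai-marketer | backend/app/services/crawl_store.py | infer_fetch_strategy
-- ===== SOURCE A (Python) =====
-- from typing import Any, Iterable
--
-- def infer_fetch_strategy(render_modes: Iterable[str]) -> str:
--     modes = {mode.strip().lower() for mode in render_modes if isinstance(mode, str) and mode.strip()}
--     if "stealth" in modes:
--         return "scrapling-stealth"
--     if "dynamic" in modes:
--         return "scrapling-dynamic"
--     if "httpx-selector" in modes:
--         return "httpx-selector-fallback"
--     if "static" in modes:
--         return "scrapling-static"
--     return "unknown"
-- ===== SOURCE B (Python) =====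
-- from typing import Any, Iterable
--
-- _PRIORITY = [
--     ("stealth", "scrapling-stealth"),
--     ("dynamic", "scrapling-dynamic"),
--     ("httpx-selector", "httpx-selector-fallback"),
--     ("static", "scrapling-static"),
-- ]
--
-- def _improve(best: int, mode: str) -> int:
--     # lower the best (smallest) priority rank seen so far, if this mode beats it
--     m = mode.strip().lower()
--     for i, (key, _) in enumerate(_PRIORITY):
--         if i < best and m == key:
--             best = i
--     return best
--
-- def infer_fetch_strategy(render_modes: Iterable[str]) -> str:
--     # single pass over the modes, tracking the best priority rank
--     best = len(_PRIORITY)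
--     for mode in render_modes:
--         if isinstance(mode, str):
--             best = _improve(best, mode)
--     return _PRIORITY[best][1] if best < len(_PRIORITY) else "unknown"
-- ===== Notes on version B (the rewrite author's own statement) =====
-- stated objective: alternative
-- what changed: Replaces A's build-a-set-then-branch-cascade with a single pass over the modes that tracks the best (lowest) rank in an explicit ordered priority table and finishes with one table lookup.
import Mathlib
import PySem

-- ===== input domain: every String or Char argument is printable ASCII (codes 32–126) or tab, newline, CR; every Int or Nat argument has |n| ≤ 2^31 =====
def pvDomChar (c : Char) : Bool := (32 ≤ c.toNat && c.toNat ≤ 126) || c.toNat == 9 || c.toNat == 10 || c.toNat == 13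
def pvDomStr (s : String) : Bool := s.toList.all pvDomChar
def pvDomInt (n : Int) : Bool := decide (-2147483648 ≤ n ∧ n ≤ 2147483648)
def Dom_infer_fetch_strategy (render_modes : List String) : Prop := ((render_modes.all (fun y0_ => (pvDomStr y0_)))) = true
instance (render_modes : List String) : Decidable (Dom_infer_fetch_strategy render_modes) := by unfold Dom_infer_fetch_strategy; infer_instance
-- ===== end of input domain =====

-- B replaces A's set-then-branch-cascade by a single pass that tracks the best (lowest)
-- rank in an explicit priority table; objective: alternative (data-driven, same cost).

-- ===== PORT A =====
def infer_fetch_strategy (render_modes : List String) : String :=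
  let modes : PySem.Set String :=
    PySem.Set.ofList
      ((render_modes.filter (fun mode => !(PySem.Str.strip mode == ""))).map
        (fun mode => PySem.Str.lower (PySem.Str.strip mode)))
  if PySem.Set.contains modes "stealth" then "scrapling-stealth"
  else if PySem.Set.contains modes "dynamic" then "scrapling-dynamic"
  else if PySem.Set.contains modes "httpx-selector" then "httpx-selector-fallback"
  else if PySem.Set.contains modes "static" then "scrapling-static"
  else "unknown"

-- ===== PORT B =====
def pvPriority : List (String × String) :=
  [("stealth", "scrapling-stealth"), ("dynamic", "scrapling-dynamic"),
   ("httpx-selector", "httpx-selector-fallback"), ("static", "scrapling-static")]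

def pvImprove (best : Int) (mode : String) : Int :=
  let m := PySem.Str.lower (PySem.Str.strip mode)
  (PySem.List.enumerate pvPriority).foldl
    (fun b ikey => if ikey.1 < b ∧ m == ikey.2.1 then ikey.1 else b) best

def infer_fetch_strategy_alt (render_modes : List String) : String :=
  let best : Int := render_modes.foldl pvImprove (PySem.List.len pvPriority)
  if best < PySem.List.len pvPriority then (PySem.List.pyGetD pvPriority best ("", "")).2
  else "unknown"

-- ===== PRECONDITION & SPEC =====
def Spec_infer_fetch_strategy (render_modes : List String) (out : String) : Prop := out = infer_fetch_strategy_alt render_modes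
instance (render_modes : List String) (out : String) : Decidable (Spec_infer_fetch_strategy render_modes out) := by unfold Spec_infer_fetch_strategy; infer_instance

-- ===== CLAIM (what is proved, stated in full; the proofs are below) =====
def Claim_equal_infer_fetch_strategy : Prop := ∀ (render_modes : List String), Dom_infer_fetch_strategy render_modes → Spec_infer_fetch_strategy render_modes (infer_fetch_strategy render_modes)

-- ===== LEMMAS AND PROOFS =====

-- normalization applied by both programs
def pvNorm (m : String) : String := PySem.Str.lower (PySem.Str.strip m)

-- rank of a normalized mode in the priority order (4 = not a known mode)
def pvRank (k : String) : Int :=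
  if k = "stealth" then 0 else if k = "dynamic" then 1
  else if k = "httpx-selector" then 2 else if k = "static" then 3 else 4

-- minimum rank over a list of normalized modes
def pvMinRank : List String → Int
  | [] => 4
  | k :: L => min (pvRank k) (pvMinRank L)

-- the answer as a function of the minimum rank
def pvOut (r : Int) : String :=
  if r = 0 then "scrapling-stealth" else if r = 1 then "scrapling-dynamic"
  else if r = 2 then "httpx-selector-fallback" else if r = 3 then "scrapling-static"
  else "unknown"

theorem pvRank_nonneg (k : String) : 0 ≤ pvRank k := by
  unfold pvRank; split_ifs <;> omega

theorem pvMinRank_nonneg (L : List String) : 0 ≤ pvMinRank L := by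
  induction L with
  | nil => simp [pvMinRank]
  | cons k L ih => simp only [pvMinRank, le_min_iff]; exact ⟨pvRank_nonneg k, ih⟩

theorem pvMinRank_le (L : List String) : pvMinRank L ≤ 4 := by
  induction L with
  | nil => simp [pvMinRank]
  | cons k L ih => simp only [pvMinRank]; exact le_trans (min_le_right _ _) ih

theorem pvMinRank_le_of_mem {L : List String} {k : String} (h : k ∈ L) :
    pvMinRank L ≤ pvRank k := by
  induction L with
  | nil => cases h
  | cons x L ih =>
    rcases List.mem_cons.mp h with h | h
    · subst h; exact min_le_left _ _
    · exact le_trans (min_le_right _ _) (ih h)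

theorem le_pvMinRank {L : List String} {j : Int} (hj : j ≤ 4)
    (h : ∀ k ∈ L, j ≤ pvRank k) : j ≤ pvMinRank L := by
  induction L with
  | nil => simpa [pvMinRank] using hj
  | cons x L ih =>
    simp only [pvMinRank, le_min_iff]
    exact ⟨h x (List.mem_cons_self), ih (fun k hk => h k (List.mem_cons_of_mem _ hk))⟩

-- B's inner loop over the enumerated table computes min with the rank
theorem pv_inner (b : Int) (hb : 0 ≤ b) (hb4 : b ≤ 4) (mode : String) :
    pvImprove b mode = min b (pvRank (pvNorm mode)) := by
  unfold pvImprove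
  rw [show PySem.Str.lower (PySem.Str.strip mode) = pvNorm mode from rfl]
  generalize pvNorm mode = m
  by_cases h0 : m = "stealth"
  · simp [PySem.List.enumerate, pvPriority, List.foldl, pvRank, h0]
    split_ifs <;> omega
  · by_cases h1 : m = "dynamic"
    · simp [PySem.List.enumerate, pvPriority, List.foldl, pvRank, h1]
      split_ifs <;> omega
    · by_cases h2 : m = "httpx-selector"
      · simp [PySem.List.enumerate, pvPriority, List.foldl, pvRank, h2]
        split_ifs <;> omega
      · by_cases h3 : m = "static"
        · simp [PySem.List.enumerate, pvPriority, List.foldl, pvRank, h3]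
          split_ifs <;> omega
        · simp [PySem.List.enumerate, pvPriority, List.foldl, pvRank, h0, h1, h2, h3]
          omega

-- B's outer loop computes the minimum rank of the normalized modes
theorem pv_outer (xs : List String) (b : Int) (hb : 0 ≤ b) (hb4 : b ≤ 4) :
    xs.foldl pvImprove b = min b (pvMinRank (xs.map pvNorm)) := by
  induction xs generalizing b with
  | nil =>
    simp only [List.foldl_nil, List.map_nil, pvMinRank]
    omega
  | cons x xs ih =>
    simp only [List.foldl_cons, List.map_cons, pvMinRank]
    rw [pv_inner b hb hb4 x,
      ih _ (le_min hb (pvRank_nonneg _)) (le_trans (min_le_left _ _) hb4)]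
    rw [min_assoc]

theorem pv_out_lookup (r : Int) (h0 : 0 ≤ r) (h4 : r ≤ 4) :
    (if r < PySem.List.len pvPriority then (PySem.List.pyGetD pvPriority r ("", "")).2
     else "unknown") = pvOut r := by
  interval_cases r <;> decide

theorem pv_B_eq (xs : List String) :
    infer_fetch_strategy_alt xs = pvOut (pvMinRank (xs.map pvNorm)) := by
  simp only [infer_fetch_strategy_alt]
  rw [pv_outer xs (PySem.List.len pvPriority) (by decide) (by decide)]
  have hlen : PySem.List.len pvPriority = 4 := by decide
  rw [hlen, min_eq_right (pvMinRank_le _)]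
  exact pv_out_lookup _ (pvMinRank_nonneg _) (pvMinRank_le _)

-- membership in the normalized list, with or without A's emptiness filter, agrees
-- for any non-empty key, since filtered-out modes normalize to ""
theorem pv_mem_filter (xs : List String) (k : String) (hk : k ≠ "") :
    (k ∈ (xs.filter (fun mode => !(PySem.Str.strip mode == ""))).map pvNorm)
      ↔ k ∈ xs.map pvNorm := by
  induction xs with
  | nil => simp
  | cons x xs ih =>
    by_cases hx : PySem.Str.strip x = ""
    · have hnx : pvNorm x = "" := by unfold pvNorm; rw [hx]; decide
      simp [hx, hnx, ih, List.mem_cons, hk]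
    · simp [hx, ih]

theorem pv_A_eq (xs : List String) :
    infer_fetch_strategy xs = pvOut (pvMinRank (xs.map pvNorm)) := by
  have hmem : ∀ k : String, k ≠ "" →
      (PySem.Set.contains
        (PySem.Set.ofList ((xs.filter (fun mode => !(PySem.Str.strip mode == ""))).map
          (fun mode => PySem.Str.lower (PySem.Str.strip mode)))) k = true
        ↔ k ∈ xs.map pvNorm) := by
    intro k hk
    rw [PySem.Set.contains_iff, PySem.Set.mem_ofList]
    have := pv_mem_filter xs k hk
    simpa only [pvNorm] using this
  simp only [infer_fetch_strategy]
  set L := xs.map pvNorm with hL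
  by_cases m0 : "stealth" ∈ L
  · rw [if_pos ((hmem _ (by decide)).mpr m0)]
    have h : pvMinRank L = 0 := le_antisymm
      (by simpa [pvRank] using pvMinRank_le_of_mem m0) (pvMinRank_nonneg _)
    rw [h]; rfl
  · rw [if_neg (fun hc => m0 ((hmem _ (by decide)).mp hc))]
    by_cases m1 : "dynamic" ∈ L
    · rw [if_pos ((hmem _ (by decide)).mpr m1)]
      have hle : pvMinRank L ≤ 1 := by simpa [pvRank] using pvMinRank_le_of_mem m1
      have hge : (1 : Int) ≤ pvMinRank L := le_pvMinRank (by omega) (fun k hk => by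
        by_cases hs : k = "stealth"
        · exact absurd (hs ▸ hk) m0
        · unfold pvRank; rw [if_neg hs]; split_ifs <;> omega)
      have h : pvMinRank L = 1 := le_antisymm hle hge
      rw [h]; rfl
    · rw [if_neg (fun hc => m1 ((hmem _ (by decide)).mp hc))]
      by_cases m2 : "httpx-selector" ∈ L
      · rw [if_pos ((hmem _ (by decide)).mpr m2)]
        have hle : pvMinRank L ≤ 2 := by simpa [pvRank] using pvMinRank_le_of_mem m2
        have hge : (2 : Int) ≤ pvMinRank L := le_pvMinRank (by omega) (fun k hk => by
          by_cases hs : k = "stealth"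
          · exact absurd (hs ▸ hk) m0
          · by_cases hd : k = "dynamic"
            · exact absurd (hd ▸ hk) m1
            · unfold pvRank; rw [if_neg hs, if_neg hd]; split_ifs <;> omega)
        have h : pvMinRank L = 2 := le_antisymm hle hge
        rw [h]; rfl
      · rw [if_neg (fun hc => m2 ((hmem _ (by decide)).mp hc))]
        by_cases m3 : "static" ∈ L
        · rw [if_pos ((hmem _ (by decide)).mpr m3)]
          have hle : pvMinRank L ≤ 3 := by simpa [pvRank] using pvMinRank_le_of_mem m3
          have hge : (3 : Int) ≤ pvMinRank L := le_pvMinRank (by omega) (fun k hk => by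
            by_cases hs : k = "stealth"
            · exact absurd (hs ▸ hk) m0
            · by_cases hd : k = "dynamic"
              · exact absurd (hd ▸ hk) m1
              · by_cases hh : k = "httpx-selector"
                · exact absurd (hh ▸ hk) m2
                · unfold pvRank; rw [if_neg hs, if_neg hd, if_neg hh]; split_ifs <;> omega)
          have h : pvMinRank L = 3 := le_antisymm hle hge
          rw [h]; rfl
        · rw [if_neg (fun hc => m3 ((hmem _ (by decide)).mp hc))]
          have hge : (4 : Int) ≤ pvMinRank L := le_pvMinRank (by omega) (fun k hk => by
            by_cases hs : k = "stealth"
            · exact absurd (hs ▸ hk) m0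
            · by_cases hd : k = "dynamic"
              · exact absurd (hd ▸ hk) m1
              · by_cases hh : k = "httpx-selector"
                · exact absurd (hh ▸ hk) m2
                · by_cases ht : k = "static"
                  · exact absurd (ht ▸ hk) m3
                  · unfold pvRank
                    rw [if_neg hs, if_neg hd, if_neg hh, if_neg ht])
          have h : pvMinRank L = 4 := le_antisymm (pvMinRank_le _) hge
          rw [h]; rfl

-- ===== VERDICT (by name: the statement is the Claim_ definition above) =====
theorem infer_fetch_strategy_spec : Claim_equal_infer_fetch_strategy := by
  intro xs _
  unfold Spec_infer_fetch_strategy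
  rw [pv_A_eq, pv_B_eq]
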